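-- pv_equiv track=rewrite | github.com/vllm-project/vllm | vllm/v1/core/sched/utils.py | _detect_infinite_loop
-- ===== SOURCE A (Python) =====
-- INFINITE_LOOP_MIN_TOKENS = 60
--
-- INFINITE_LOOP_WINDOW_SIZE = 30
--
-- def _compute_sequence_hash(tokens: list, start: int, length: int) -> int:
--     """Compute a hash for a subsequence of tokens using polynomial rolling hash.
--
--     This provides efficient comparison capability for detecting repeated patterns.
--     The hash function uses a prime base with a large Mersenne prime modulus
--     to minimize collision probability.
--
--     Args:
--         tokens: The full token sequence
--         start: Starting index of the subsequence
--         length: Length of the subsequence to hash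
--
--     Returns:
--         Integer hash value for the subsequence
--
--     Time Complexity: O(length)
--     Space Complexity: O(1)
--     """
--     # Prime base for polynomial hashing - chosen to minimize collisions
--     # Using 31 as it's a common choice that works well with ASCII-range values
--     BASE = 31
--     # Mersenne prime (2^61 - 1) provides excellent distribution and allows
--     # efficient modulo operations on 64-bit systems
--     MOD = 2305843009213693951  # 2**61 - 1
--
--     hash_val = 0
--     for i in range(length):
--         hash_val = (hash_val * BASE + tokens[start + i]) % MOD
--     return hash_val
--
-- def _detect_infinite_loop(output_token_ids: list) -> bool:
--     """Detect if the model has entered an infinite loop state.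
--
--     Uses a sliding window approach with hash-based comparison for efficiency.
--     The algorithm checks if the last N tokens are identical to the preceding
--     N tokens, which indicates the model is stuck in a repetitive pattern.
--
--     This is particularly important for multimodal models like PaddleOCR-VL
--     that can get "stuck" on certain visual features and produce repetitive
--     outputs like:
--         - "6.3.1. 2 2 6.3.2 6.3.3. 6.3.1. 2 2 6.3.2 6.3.3. ..."
--         - "곧 곧 곧 곧 곧 곧 곧 곧 곧 곧 ..."
--
--     Algorithm:
--         1. Early exit if not enough tokens (< 2 * window_size)
--         2. Compute hash of last window (tokens[-window:])
--         3. Compute hash of previous window (tokens[-2*window:-window])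
--         4. If hashes differ, no loop detected (fast path)
--         5. If hashes match, verify with direct comparison (handle collisions)
--
--     Args:
--         output_token_ids: List of generated token IDs
--
--     Returns:
--         True if infinite loop detected, False otherwise
--
--     Time Complexity: O(window_size) for hash computation
--     Space Complexity: O(1) additional space
--     """
--     num_tokens = len(output_token_ids)
--
--     # Early exit: need at least 2 windows worth of tokens
--     if num_tokens < INFINITE_LOOP_MIN_TOKENS:
--         return False
--
--     window = INFINITE_LOOP_WINDOW_SIZE
--     if num_tokens < 2 * window:
--         return False
--
--     # Define window boundaries
--     # prev_window: tokens[num_tokens - 2*window : num_tokens - window]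
--     # curr_window: tokens[num_tokens - window : num_tokens]
--     prev_start = num_tokens - 2 * window
--     curr_start = num_tokens - window
--
--     # Compute hashes for both windows
--     prev_hash = _compute_sequence_hash(output_token_ids, prev_start, window)
--     curr_hash = _compute_sequence_hash(output_token_ids, curr_start, window)
--
--     # Fast path: if hashes don't match, definitely no infinite loop
--     if prev_hash != curr_hash:
--         return False
--
--     # Hashes match - verify with direct comparison to handle hash collisions.
--     # This is O(window_size) but only executed when hashes match, which is
--     # rare for non-repetitive sequences.
--     for i in range(window):
--         if output_token_ids[prev_start + i] != output_token_ids[curr_start + i]: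
--             return False
--
--     # Confirmed: last window is identical to previous window
--     return True
-- ===== SOURCE B (Python) =====
-- INFINITE_LOOP_MIN_TOKENS = 60
--
-- INFINITE_LOOP_WINDOW_SIZE = 30
--
--
-- def _detect_infinite_loop(output_token_ids: list) -> bool:
--     """Repetition check by direct slice equality: no hashing needed for a
--     constant-size window."""
--     num_tokens = len(output_token_ids)
--     if num_tokens < INFINITE_LOOP_MIN_TOKENS:
--         return False
--     window = INFINITE_LOOP_WINDOW_SIZE
--     if num_tokens < 2 * window:
--         return False
--     return (output_token_ids[num_tokens - 2 * window:num_tokens - window]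
--             == output_token_ids[num_tokens - window:])
-- ===== Notes on version B (the rewrite author's own statement) =====
-- stated objective: simpler
-- what changed: Replaces the polynomial-rolling-hash fast path plus element-wise verification loop with a single direct slice-equality comparison of the two 30-token windows.
import Mathlib
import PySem

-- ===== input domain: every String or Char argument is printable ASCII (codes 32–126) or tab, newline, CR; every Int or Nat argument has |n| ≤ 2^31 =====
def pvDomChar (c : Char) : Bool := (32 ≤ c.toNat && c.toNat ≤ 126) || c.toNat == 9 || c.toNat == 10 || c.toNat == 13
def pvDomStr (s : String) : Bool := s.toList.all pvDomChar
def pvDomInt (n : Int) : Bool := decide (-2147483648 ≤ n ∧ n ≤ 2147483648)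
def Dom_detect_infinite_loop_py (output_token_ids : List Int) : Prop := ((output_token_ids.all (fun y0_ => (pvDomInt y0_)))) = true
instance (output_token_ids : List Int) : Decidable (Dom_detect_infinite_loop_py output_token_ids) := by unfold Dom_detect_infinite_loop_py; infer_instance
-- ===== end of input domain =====

-- B replaces A's polynomial-rolling-hash fast path + verification loop by one direct
-- slice-equality comparison of the two 30-token windows (simpler, same result).

-- ===== PORT A =====
-- tokens[start + i] is always in range at A's call sites, so pyGetD's default 0 is never used
def compute_sequence_hash (tokens : List Int) (start : Int) (length : Int) : Int :=
  (PySem.List.pyRange 0 length 1).foldl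
    (fun hash_val i =>
      PySem.Int.mod (hash_val * 31 + PySem.List.pyGetD tokens (start + i) 0) 2305843009213693951)
    0

def detect_infinite_loop_py (output_token_ids : List Int) : Bool :=
  let num_tokens : Int := output_token_ids.length
  if num_tokens < 60 then false
  else
    let window : Int := 30
    if num_tokens < 2 * window then false
    else
      let prev_start := num_tokens - 2 * window
      let curr_start := num_tokens - window
      let prev_hash := compute_sequence_hash output_token_ids prev_start window
      let curr_hash := compute_sequence_hash output_token_ids curr_start window
      if prev_hash ≠ curr_hash then false
      else
        -- for i in range(window): if tokens[prev+i] != tokens[curr+i]: return False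
        if (PySem.List.pyRange 0 window 1).all (fun i =>
             PySem.List.pyGetD output_token_ids (prev_start + i) 0
               == PySem.List.pyGetD output_token_ids (curr_start + i) 0)
        then true else false

-- ===== PORT B =====
def detect_infinite_loop_py_alt (output_token_ids : List Int) : Bool :=
  let num_tokens : Int := output_token_ids.length
  if num_tokens < 60 then false
  else
    let window : Int := 30
    if num_tokens < 2 * window then false
    else
      PySem.List.slice output_token_ids (some (num_tokens - 2 * window)) (some (num_tokens - window))
        == PySem.List.slice output_token_ids (some (num_tokens - window)) none

-- ===== PRECONDITION & SPEC =====
def Spec_detect_infinite_loop_py (output_token_ids : List Int) (out : Bool) : Prop := out = detect_infinite_loop_py_alt output_token_ids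
instance (output_token_ids : List Int) (out : Bool) : Decidable (Spec_detect_infinite_loop_py output_token_ids out) := by unfold Spec_detect_infinite_loop_py; infer_instance

-- ===== CLAIM (what is proved, stated in full; the proofs are below) =====
def Claim_equal_detect_infinite_loop_py : Prop := ∀ (output_token_ids : List Int), Dom_detect_infinite_loop_py output_token_ids → Spec_detect_infinite_loop_py output_token_ids (detect_infinite_loop_py output_token_ids)

-- ===== LEMMAS AND PROOFS =====

-- pointwise equality of the two windows makes the two hashes equal
theorem hash_eq_of_pointwise (xs : List Int) (p c : Int)
    (h : ∀ i : Int, 0 ≤ i → i < 30 →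
      PySem.List.pyGetD xs (p + i) 0 = PySem.List.pyGetD xs (c + i) 0) :
    compute_sequence_hash xs p 30 = compute_sequence_hash xs c 30 := by
  unfold compute_sequence_hash
  apply PySem.List.foldl_congr_mem
  intro acc i hi
  rw [PySem.List.mem_pyRange_one] at hi
  rw [h i hi.1 hi.2]

-- the slice equality of B is the pointwise check of A's verification loop
theorem slice_eq_iff_pointwise (xs : List Int) (hlen : 60 ≤ xs.length) :
    (PySem.List.slice xs (some ((xs.length : Int) - 60)) (some ((xs.length : Int) - 30))
      = PySem.List.slice xs (some ((xs.length : Int) - 30)) none)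
    ↔ (∀ i : Int, 0 ≤ i → i < 30 →
        PySem.List.pyGetD xs ((xs.length : Int) - 60 + i) 0
          = PySem.List.pyGetD xs ((xs.length : Int) - 30 + i) 0) := by
  have h60 : ((xs.length : Int) - 60) = ((xs.length - 60 : Nat) : Int) := by omega
  have h30 : ((xs.length : Int) - 30) = ((xs.length - 30 : Nat) : Int) := by omega
  have hs1 : PySem.List.slice xs (some ((xs.length : Int) - 60)) (some ((xs.length : Int) - 30))
      = (xs.drop (xs.length - 60)).take 30 := by
    rw [h60, h30, PySem.List.slice_natCast]
    congr 1
    omega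
  have hs2 : PySem.List.slice xs (some ((xs.length : Int) - 30)) none
      = xs.drop (xs.length - 30) := by
    rw [h30, PySem.List.slice_from_natCast]
  rw [hs1, hs2]
  have hlp : ((xs.drop (xs.length - 60)).take 30).length = 30 := by simp; omega
  have hlc : (xs.drop (xs.length - 30)).length = 30 := by simp; omega
  constructor
  · intro heq i h0 h3
    have hi30 : i.toNat < 30 := by omega
    have hp : (xs.length : Int) - 60 + i = ((xs.length - 60 + i.toNat : Nat) : Int) := by omega
    have hc : (xs.length : Int) - 30 + i = ((xs.length - 30 + i.toNat : Nat) : Int) := by omega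
    rw [hp, hc, PySem.List.pyGetD_natCast, PySem.List.pyGetD_natCast]
    have h1 : xs.length - 60 + i.toNat < xs.length := by omega
    have h2 : xs.length - 30 + i.toNat < xs.length := by omega
    rw [List.getD_eq_getElem xs 0 h1, List.getD_eq_getElem xs 0 h2]
    have ht : ((xs.drop (xs.length - 60)).take 30)[i.toNat]'(by omega)
        = (xs.drop (xs.length - 30))[i.toNat]'(by omega) := by
      exact List.getElem_of_eq heq _
    rw [List.getElem_take, List.getElem_drop, List.getElem_drop] at ht
    convert ht using 2
  · intro hpt
    apply List.ext_getElem (by omega)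
    intro k hk1 hk2
    have hk : k < 30 := by omega
    have := hpt k (by omega) (by exact_mod_cast hk)
    have hp : (xs.length : Int) - 60 + (k : Int) = ((xs.length - 60 + k : Nat) : Int) := by omega
    have hc : (xs.length : Int) - 30 + (k : Int) = ((xs.length - 30 + k : Nat) : Int) := by omega
    rw [hp, hc, PySem.List.pyGetD_natCast, PySem.List.pyGetD_natCast] at this
    have h1 : xs.length - 60 + k < xs.length := by omega
    have h2 : xs.length - 30 + k < xs.length := by omega
    rw [List.getD_eq_getElem xs 0 h1, List.getD_eq_getElem xs 0 h2] at this
    rw [List.getElem_take, List.getElem_drop, List.getElem_drop]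
    convert this using 2

-- ===== VERDICT (by name: the statement is the Claim_ definition above) =====
theorem detect_infinite_loop_py_spec : Claim_equal_detect_infinite_loop_py := by
  intro xs _
  unfold Spec_detect_infinite_loop_py detect_infinite_loop_py detect_infinite_loop_py_alt
  by_cases hlt : (xs.length : Int) < 60
  · simp only [if_pos hlt]
  · have hge : 60 ≤ xs.length := by omega
    have h2 : ¬ ((xs.length : Int) < 2 * 30) := by omega
    simp only [if_neg hlt, if_neg h2]
    have e : (xs.length : Int) - 2 * 30 = (xs.length : Int) - 60 := by ring
    rw [e]
    by_cases hall : ∀ i : Int, 0 ≤ i → i < 30 →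
        PySem.List.pyGetD xs ((xs.length : Int) - 60 + i) 0
          = PySem.List.pyGetD xs ((xs.length : Int) - 30 + i) 0
    · have hhash := hash_eq_of_pointwise xs _ _ hall
      rw [if_neg (show ¬ (compute_sequence_hash xs ((xs.length : Int) - 60) 30
            ≠ compute_sequence_hash xs ((xs.length : Int) - 30) 30) from fun hn => hn hhash)]
      have hall' : (PySem.List.pyRange 0 30 1).all (fun i =>
          PySem.List.pyGetD xs ((xs.length : Int) - 60 + i) 0
            == PySem.List.pyGetD xs ((xs.length : Int) - 30 + i) 0) = true := by
        rw [List.all_eq_true]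
        intro i hi
        rw [PySem.List.mem_pyRange_one] at hi
        simpa using hall i hi.1 hi.2
      rw [if_pos hall']
      exact (beq_iff_eq.mpr ((slice_eq_iff_pointwise xs hge).mpr hall)).symm
    · have hb : (PySem.List.slice xs (some ((xs.length : Int) - 60)) (some ((xs.length : Int) - 30))
            == PySem.List.slice xs (some ((xs.length : Int) - 30)) none) = false := by
        rw [beq_eq_false_iff_ne]
        intro hsl
        exact hall ((slice_eq_iff_pointwise xs hge).mp hsl)
      rw [hb]
      by_cases hh : compute_sequence_hash xs ((xs.length : Int) - 60) 30
          ≠ compute_sequence_hash xs ((xs.length : Int) - 30) 30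
      · rw [if_pos hh]
      · rw [if_neg hh, if_neg]
        simp only [List.all_eq_true]
        intro hc
        apply hall
        intro i h0 h3
        simpa using hc i (by rw [PySem.List.mem_pyRange_one]; exact ⟨h0, h3⟩)
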